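-- pv_equiv track=rewrite | github.com/nsauvil/ETSINF-4 | ALT/Práctica2/langford.py | langford
-- ===== SOURCE A (Python) =====
-- def langford(N):
--     N2   = 2*N
--     seq  = [0]*N2
--     def backtracking(num):
--         if num<=0: #es terminal
--             yield "-".join(map(str, seq))
--         else: #No es terminal
--             # buscamos una posicion para situar una pareja num
--             for i in range(0,len(seq) - num - 1): #Ramificamos
--                 j = i + num + 1
--                 if seq[i] == seq[j] == 0 and j <= 2*N-1: #Si es prometedor
--                     seq[i] = seq[j] = num #Modificaciones (cambair valor seq)
--                     yield from backtracking(num-1) #bracktracking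
--                     #No sirve la rama: Deshacemos las modificaciones (seq a 0)
--                     seq[i] = seq[j] = 0 #Deshacemos (Ponemos a 0 los huecos usados)
--
--     if N%4 in (0,3):
--         yield from backtracking(N)
-- ===== SOURCE B (Python) =====
-- def langford(N):
--     # Level-by-level (breadth-first) enumeration: extend every partial placement
--     # with each feasible position for the current number; leaves come out in the
--     # same left-to-right order as the recursive DFS.
--     if N % 4 not in (0, 3):
--         return
--     n2 = 2 * N
--     states = [[0] * n2]
--     for num in range(N, 0, -1):
--         new_states = []
--         for s in states:
--             for i in range(n2 - num - 1):
--                 j = i + num + 1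
--                 if s[i] == 0 and s[j] == 0:
--                     t = list(s)
--                     t[i] = num
--                     t[j] = num
--                     new_states.append(t)
--         states = new_states
--     for s in states:
--         yield "-".join(map(str, s))
-- ===== Notes on version B (the rewrite author's own statement) =====
-- stated objective: alternative
-- what changed: The recursive mutate-and-undo generator is replaced by an iterative level-by-level (breadth-first) enumeration that extends every partial placement with each feasible position for the current number, producing the same sequences in the same order with no recursion or in-place undo.
import Mathlib
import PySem

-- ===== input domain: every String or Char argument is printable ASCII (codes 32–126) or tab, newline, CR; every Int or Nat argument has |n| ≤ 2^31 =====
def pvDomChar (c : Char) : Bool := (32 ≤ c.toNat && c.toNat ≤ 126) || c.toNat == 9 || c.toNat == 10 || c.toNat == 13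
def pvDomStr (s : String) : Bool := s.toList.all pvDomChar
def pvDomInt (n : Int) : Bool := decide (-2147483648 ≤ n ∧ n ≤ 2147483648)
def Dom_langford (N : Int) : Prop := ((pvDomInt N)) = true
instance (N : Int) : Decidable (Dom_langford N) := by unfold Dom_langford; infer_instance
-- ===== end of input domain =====

-- B replaces the recursive generator with an iterative level-by-level (breadth-first)
-- enumeration of partial placements; same outputs in the same order (alternative decomposition).

-- ===== PORT A =====
-- "-".join(map(str, seq))
def pvJoin (seq : List Int) : String := PySem.Str.join "-" (seq.map PySem.Int.toStr)

-- the inner generator `backtracking`; fuel only totalizes the recursion (num decreases by 1 each level)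
def pvBtA (N : Int) (fuel : Nat) (seq : List Int) (num : Int) : List String :=
  if num ≤ 0 then [pvJoin seq]
  else
    match fuel with
    | 0 => []
    | fuel + 1 =>
      (PySem.List.pyRange 0 ((seq.length : Int) - num - 1) 1).foldl
        (fun acc i =>
          let j := i + num + 1
          if PySem.List.pyGetD seq i 0 = PySem.List.pyGetD seq j 0 ∧
             PySem.List.pyGetD seq j 0 = 0 ∧ j ≤ 2*N - 1 then
            acc ++ pvBtA N fuel (PySem.List.pySetD (PySem.List.pySetD seq i num) j num) (num - 1)
          else acc) []

def langford (N : Int) : List String :=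
  let seq := List.replicate (2*N).toNat 0
  if PySem.Int.mod N 4 = 0 ∨ PySem.Int.mod N 4 = 3 then pvBtA N N.toNat seq N else []

-- ===== PORT B =====
-- one level of Source B's loop: extend every partial placement with each feasible position for `num`
def pvExpand (n2 : Int) (num : Int) (states : List (List Int)) : List (List Int) :=
  states.foldl (fun new s =>
    (PySem.List.pyRange 0 (n2 - num - 1) 1).foldl
      (fun new i =>
        let j := i + num + 1
        if PySem.List.pyGetD s i 0 = 0 ∧ PySem.List.pyGetD s j 0 = 0 then
          new ++ [PySem.List.pySetD (PySem.List.pySetD s i num) j num]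
        else new) new) []

def langford_alt (N : Int) : List String :=
  if PySem.Int.mod N 4 = 0 ∨ PySem.Int.mod N 4 = 3 then
    let n2 := 2*N
    let states := (PySem.List.pyRange N 0 (-1)).foldl
      (fun st num => pvExpand n2 num st) [List.replicate n2.toNat 0]
    states.map pvJoin
  else []

-- ===== PRECONDITION & SPEC =====
def Spec_langford (N : Int) (out : List String) : Prop := out = langford_alt N
instance (N : Int) (out : List String) : Decidable (Spec_langford N out) := by unfold Spec_langford; infer_instance

-- ===== CLAIM (what is proved, stated in full; the proofs are below) =====
def Claim_equal_langford : Prop := ∀ (N : Int), Dom_langford N → Spec_langford N (langford N)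

-- ===== LEMMAS AND PROOFS =====

-- generic shape of both ports' conditional-append loops
theorem pvFoldIte {α β : Type} (l : List α) (p : α → Prop) [DecidablePred p]
    (f : α → List β) (acc : List β) :
    l.foldl (fun a x => if p x then a ++ f x else a) acc
      = acc ++ l.flatMap (fun x => if p x then f x else []) := by
  induction l generalizing acc with
  | nil => simp
  | cons x xs ih => simp only [List.foldl_cons, List.flatMap_cons]
                    split_ifs <;> simp [ih, List.append_assoc]

-- the children of one partial placement, as a flat list
def pvCh (n2 num : Int) (s : List Int) : List (List Int) :=
  (PySem.List.pyRange 0 (n2 - num - 1) 1).flatMap (fun i =>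
    if PySem.List.pyGetD s i 0 = 0 ∧ PySem.List.pyGetD s (i + num + 1) 0 = 0 then
      [PySem.List.pySetD (PySem.List.pySetD s i num) (i + num + 1) num]
    else [])

theorem pvExpand_eq (n2 num : Int) (states : List (List Int)) :
    pvExpand n2 num states = states.flatMap (pvCh n2 num) := by
  unfold pvExpand
  have h : ∀ (acc : List (List Int)),
      states.foldl (fun new s =>
        (PySem.List.pyRange 0 (n2 - num - 1) 1).foldl
          (fun new i =>
            if PySem.List.pyGetD s i 0 = 0 ∧ PySem.List.pyGetD s (i + num + 1) 0 = 0 then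
              new ++ [PySem.List.pySetD (PySem.List.pySetD s i num) (i + num + 1) num]
            else new) new) acc = acc ++ states.flatMap (pvCh n2 num) := by
    induction states with
    | nil => simp
    | cons s rest ih =>
        intro acc
        simp only [List.foldl_cons, List.flatMap_cons]
        rw [pvFoldIte, ih, List.append_assoc]; rfl
  exact h []

-- B's remaining loop, from level `num` down to 1
def pvRun (n2 : Int) (num : Int) (states : List (List Int)) : List (List Int) :=
  (PySem.List.pyRange num 0 (-1)).foldl (fun st m => pvExpand n2 m st) states

theorem pvRun_append (n2 num : Int) (L1 L2 : List (List Int)) :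
    pvRun n2 num (L1 ++ L2) = pvRun n2 num L1 ++ pvRun n2 num L2 := by
  unfold pvRun
  induction PySem.List.pyRange num 0 (-1) generalizing L1 L2 with
  | nil => simp
  | cons m ms ih =>
      simp only [List.foldl_cons]
      rw [pvExpand_eq n2 m (L1 ++ L2), List.flatMap_append, ← pvExpand_eq, ← pvExpand_eq, ih]

theorem pvRun_nil (n2 num : Int) : pvRun n2 num [] = [] := by
  unfold pvRun
  induction PySem.List.pyRange num 0 (-1) with
  | nil => rfl
  | cons m ms ih => simpa [pvExpand_eq] using ih

theorem pvRun_flatMap {α : Type} (n2 num : Int) (xs : List α) (g : α → List (List Int)) :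
    pvRun n2 num (xs.flatMap g) = xs.flatMap (fun x => pvRun n2 num (g x)) := by
  induction xs with
  | nil => simpa using pvRun_nil n2 num
  | cons x rest ih => simp only [List.flatMap_cons, pvRun_append, ih]

theorem pvRun_ite (n2 num : Int) (p : Prop) [Decidable p] (L : List (List Int)) :
    pvRun n2 num (if p then L else []) = if p then pvRun n2 num L else [] := by
  split_ifs <;> simp [pvRun_nil]

-- main simulation: A's DFS from (seq, num) yields exactly B's remaining levels, rendered
theorem pvMain (N : Int) (fuel : Nat) (num : Int) (hfuel : num ≤ (fuel : Int))
    (seq : List Int) (hlen : (seq.length : Int) = 2*N) :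
    pvBtA N fuel seq num = (pvRun (2*N) num [seq]).map pvJoin := by
  induction fuel generalizing num seq with
  | zero =>
      have h0 : num ≤ 0 := by exact_mod_cast hfuel
      rw [pvBtA, if_pos h0]
      unfold pvRun
      rw [PySem.List.pyRange_neg_one_eq_nil h0]
      simp
  | succ f ih =>
      by_cases h0 : num ≤ 0
      · rw [pvBtA, if_pos h0]
        unfold pvRun
        rw [PySem.List.pyRange_neg_one_eq_nil h0]
        simp
      · have hpos : 0 < num := lt_of_not_ge h0
        rw [pvBtA, if_neg h0]
        -- A's level loop as a flatMap
        rw [pvFoldIte (p := fun i =>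
              PySem.List.pyGetD seq i 0 = PySem.List.pyGetD seq (i + num + 1) 0 ∧
              PySem.List.pyGetD seq (i + num + 1) 0 = 0 ∧ i + num + 1 ≤ 2*N - 1)]
        rw [List.nil_append, hlen]
        -- B's side: peel level `num`
        unfold pvRun
        rw [PySem.List.pyRange_neg_one_cons hpos, List.foldl_cons]
        have hexp : pvExpand (2*N) num [seq] = pvCh (2*N) num seq := by
          rw [pvExpand_eq]; simp
        rw [hexp]
        show _ = (pvRun (2*N) (num - 1) (pvCh (2*N) num seq)).map pvJoin
        unfold pvCh
        rw [pvRun_flatMap, List.map_flatMap]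
        apply List.flatMap_congr
        intro i hi
        rw [PySem.List.mem_pyRange_one] at hi
        -- the two guards agree on in-range i, and j ≤ 2N-1 is automatic
        have hcond : (PySem.List.pyGetD seq i 0 = PySem.List.pyGetD seq (i + num + 1) 0 ∧
              PySem.List.pyGetD seq (i + num + 1) 0 = 0 ∧ i + num + 1 ≤ 2*N - 1) ↔
            (PySem.List.pyGetD seq i 0 = 0 ∧ PySem.List.pyGetD seq (i + num + 1) 0 = 0) := by
          constructor
          · rintro ⟨h1, h2, _⟩; exact ⟨h1.trans h2, h2⟩
          · rintro ⟨h1, h2⟩; exact ⟨h1.trans h2.symm, h2, by omega⟩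
        rw [if_congr hcond rfl rfl, pvRun_ite]
        split_ifs with hc
        · rw [ih (num - 1) (by omega)
            (PySem.List.pySetD (PySem.List.pySetD seq i num) (i + num + 1) num)
            (by simp [PySem.List.length_pySetD, hlen])]
        · rfl

-- ===== VERDICT (by name: the statement is the Claim_ definition above) =====
theorem langford_spec : Claim_equal_langford := by
  intro N _
  unfold Spec_langford langford langford_alt
  split_ifs with hg
  · by_cases hN : 0 ≤ N
    · rw [pvMain N N.toNat N (Int.self_le_toNat N) _
        (by simp [Int.toNat_of_nonneg (by omega : (0:Int) ≤ 2*N)])]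
      rfl
    · have h0 : N ≤ 0 := by omega
      rw [pvBtA.eq_def, if_pos h0, PySem.List.pyRange_neg_one_eq_nil h0]
      simp
  · rfl
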